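-- pv_equiv track=rewrite | github.com/Urlugall/DivideImageByParts | main.py | find_nearest_component
-- ===== SOURCE A (Python) =====
-- def find_nearest_component(small_component, large_components):
--     """
--     Find the nearest large component to a given small component.
--
--     Args:
--         small_component (list): A list of (x, y) tuples representing the small component.
--         large_components (list): A list of large components, each being a list of (x, y) tuples.
--
--     Returns:
--         int: The index of the nearest large component in 'large_components'.
--     """
--     min_distance = float('inf')
--     nearest_index = -1
--
--     for i, large_component in enumerate(large_components):
--         for (x1, y1) in small_component:
--             for (x2, y2) in large_component:
--                 distance = (x2 - x1) ** 2 + (y2 - y1) ** 2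
--                 if distance < min_distance:
--                     min_distance = distance
--                     nearest_index = i
--
--     return nearest_index
-- ===== SOURCE B (Python) =====
-- def find_nearest_component(small_component, large_components):
--     """Index of the nearest large component (first index on ties), -1 if no pairs.
--
--     Different algorithm: flatten all large points into one x-sorted list
--     labeled with their component index; for each small point, binary-search
--     its x position and scan outward in both directions, pruning a direction
--     as soon as the x-distance alone squared exceeds the best squared distance
--     found so far (safe: squared distance >= squared x-distance, and x-distance
--     grows monotonically away from the query in a sorted list). The running
--     best is the lexicographic minimum of (squared distance, component index),
--     which reproduces A's first-index tie-break.
--     """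
--     pts = sorted(((x, y, i)
--                   for i, comp in enumerate(large_components)
--                   for (x, y) in comp), key=lambda t: t[0])
--     n = len(pts)
--     best = None  # (squared distance, component index), lexicographic minimum
--     for (qx, qy) in small_component:
--         # leftmost insertion point of qx among the x-coordinates
--         lo, hi = 0, n
--         while lo < hi:
--             mid = (lo + hi) // 2
--             if pts[mid][0] < qx:
--                 lo = mid + 1
--             else:
--                 hi = mid
--         # scan to the right with pruning
--         j = lo
--         while j < n:
--             x, y, i = pts[j]
--             dx2 = (x - qx) ** 2
--             if best is not None and x >= qx and dx2 > best[0]: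
--                 break
--             cand = (dx2 + (y - qy) ** 2, i)
--             if best is None or cand < best:
--                 best = cand
--             j += 1
--         # scan to the left with pruning
--         j = lo - 1
--         while j >= 0:
--             x, y, i = pts[j]
--             dx2 = (x - qx) ** 2
--             if best is not None and x <= qx and dx2 > best[0]:
--                 break
--             cand = (dx2 + (y - qy) ** 2, i)
--             if best is None or cand < best:
--                 best = cand
--             j -= 1
--     return best[1] if best is not None else -1
-- ===== Notes on version B (the rewrite author's own statement) =====
-- stated objective: faster
-- what changed: Replaces A's exhaustive triple loop over all point pairs with a sort-and-prune nearest-neighbour search: all large points are flattened into one x-sorted list labelled by component index, and each small point binary-searches its x position and scans outward in both directions, stopping a direction as soon as the squared x-distance alone exceeds the best squared distance found so far; the lexicographic (distance, index) minimum reproduces A's first-index tie-break.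
import Mathlib
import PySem

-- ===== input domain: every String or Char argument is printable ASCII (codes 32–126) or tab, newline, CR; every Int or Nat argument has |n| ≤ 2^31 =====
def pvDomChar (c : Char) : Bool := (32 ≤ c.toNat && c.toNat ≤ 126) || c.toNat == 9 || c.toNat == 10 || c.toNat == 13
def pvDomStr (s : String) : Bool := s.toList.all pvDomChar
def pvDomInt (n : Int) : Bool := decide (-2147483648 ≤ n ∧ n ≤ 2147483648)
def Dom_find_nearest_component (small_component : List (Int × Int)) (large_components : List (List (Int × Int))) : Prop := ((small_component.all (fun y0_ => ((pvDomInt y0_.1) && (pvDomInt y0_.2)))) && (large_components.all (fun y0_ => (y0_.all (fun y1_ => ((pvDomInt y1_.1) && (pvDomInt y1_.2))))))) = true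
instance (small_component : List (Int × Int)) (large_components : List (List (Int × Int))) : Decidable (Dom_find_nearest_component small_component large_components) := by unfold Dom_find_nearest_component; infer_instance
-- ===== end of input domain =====

-- B replaces A's exhaustive scan of all point pairs by a sort-and-prune nearest-neighbour
-- search over one x-sorted labelled point list (objective: faster; exact same result).

-- ===== PORT A =====
-- the update A performs for one distance (the body of the innermost loop)
def fncUpd (i : Int) (st : Option Int × Int) (x : Int) : Option Int × Int :=
  match st.1 with
  | none => (some x, i)
  | some m => if x < m then (some x, i) else st

-- one iteration of A's outer loop (the two inner loops over small and the component)
def fncAstep (small_component : List (Int × Int)) (st : Option Int × Int)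
    (ic : Int × List (Int × Int)) : Option Int × Int :=
  small_component.foldl (fun st p1 =>
    ic.2.foldl (fun st p2 =>
      fncUpd ic.1 st ((p2.1 - p1.1) ^ 2 + (p2.2 - p1.2) ^ 2)) st) st

def find_nearest_component (small_component : List (Int × Int)) (large_components : List (List (Int × Int))) : Int :=
  ((PySem.List.enumerate large_components 0).foldl (fncAstep small_component)
      ((none : Option Int), (-1 : Int))).2

-- ===== PORT B =====
-- Python's lexicographic < on (distance, index) int pairs
def pvLt (a b : Int × Int) : Bool := a.1 < b.1 || (a.1 == b.1 && a.2 < b.2)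

-- 'if best is None or cand < best: best = cand'
def pvUpd (best : Option (Int × Int)) (c : Int × Int) : Option (Int × Int) :=
  match best with
  | none => some c
  | some b => if pvLt c b then some c else some b

-- the labelled point list in generator order: (x, y, component index)
def pvLabeled (large_components : List (List (Int × Int))) : List (Int × Int × Int) :=
  (PySem.List.enumerate large_components 0).flatMap (fun ic => ic.2.map (fun p => (p.1, p.2, ic.1)))

-- the candidate pair B builds for a labelled point t and query (qx, qy)
def pvCand (qx qy : Int) (t : Int × Int × Int) : Int × Int :=
  ((t.1 - qx) ^ 2 + (t.2.1 - qy) ^ 2, t.2.2)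

-- B's hand-written binary search; lo, hi, mid stay ≥ 0 in Python so Nat arithmetic
-- ((lo+hi)//2 on nonnegatives) is exact; pts[mid] is always in range (lo < hi ≤ len)
-- so getD's default is never used; the fuel argument (called with pts.length, an upper
-- bound on the strictly shrinking interval width hi - lo) is only a totality guard and
-- is never exhausted before the Python loop exits
def pvBisect (pts : List (Int × Int × Int)) (qx : Int) : Nat → Nat → Nat → Nat
  | 0, lo, _ => lo
  | fuel + 1, lo, hi =>
    if lo < hi then
      let mid := (lo + hi) / 2
      if (pts.getD mid (0, 0, 0)).1 < qx then pvBisect pts qx fuel (mid + 1) hi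
      else pvBisect pts qx fuel lo mid
    else lo

-- the break test of the rightward while loop: 'best is not None and x >= qx and dx2 > best[0]'
def pvBrkR (qx x : Int) (best : Option (Int × Int)) : Bool :=
  match best with
  | none => false
  | some b => decide (qx ≤ x) && decide (b.1 < (x - qx) ^ 2)

-- leftward break test: 'best is not None and x <= qx and dx2 > best[0]'
def pvBrkL (qx x : Int) (best : Option (Int × Int)) : Bool :=
  match best with
  | none => false
  | some b => decide (x ≤ qx) && decide (b.1 < (x - qx) ^ 2)

-- the rightward index loop 'while j < n', transcribed as structural recursion
-- over pts[lo:], visiting the same elements in the same order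
def pvScanR (qx qy : Int) : List (Int × Int × Int) → Option (Int × Int) → Option (Int × Int)
  | [], best => best
  | t :: rest, best =>
    if pvBrkR qx t.1 best then best
    else pvScanR qx qy rest (pvUpd best (pvCand qx qy t))

-- the leftward index loop 'while j >= 0', structural recursion over reversed pts[:lo]
def pvScanL (qx qy : Int) : List (Int × Int × Int) → Option (Int × Int) → Option (Int × Int)
  | [], best => best
  | t :: rest, best =>
    if pvBrkL qx t.1 best then best
    else pvScanL qx qy rest (pvUpd best (pvCand qx qy t))

-- one iteration of B's query loop: binary search, then the two pruned scans
def pvStep (pts : List (Int × Int × Int)) (best : Option (Int × Int)) (q : Int × Int) :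
    Option (Int × Int) :=
  let lo := pvBisect pts q.1 pts.length 0 pts.length
  pvScanL q.1 q.2 ((pts.take lo).reverse) (pvScanR q.1 q.2 (pts.drop lo) best)

def find_nearest_component_alt (small_component : List (Int × Int)) (large_components : List (List (Int × Int))) : Int :=
  let pts := PySem.List.sorted (pvLabeled large_components) (fun t => t.1) false
  match small_component.foldl (pvStep pts) none with
  | none => -1
  | some b => b.2

-- ===== PRECONDITION & SPEC =====
def Spec_find_nearest_component (small_component : List (Int × Int)) (large_components : List (List (Int × Int))) (out : Int) : Prop := out = find_nearest_component_alt small_component large_components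
instance (small_component : List (Int × Int)) (large_components : List (List (Int × Int))) (out : Int) : Decidable (Spec_find_nearest_component small_component large_components out) := by unfold Spec_find_nearest_component; infer_instance

-- ===== CLAIM (what is proved, stated in full; the proofs are below) =====
def Claim_equal_find_nearest_component : Prop := ∀ (small_component : List (Int × Int)) (large_components : List (List (Int × Int))), Dom_find_nearest_component small_component large_components → Spec_find_nearest_component small_component large_components (find_nearest_component small_component large_components)

-- ===== LEMMAS AND PROOFS =====

-- ---- order facts about pvLt (a strict total lexicographic order) ----
lemma pvLt_self (a : Int × Int) : pvLt a a = false := by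
  simp [pvLt]

lemma pvLt_asymm_eq {a b : Int × Int} (h1 : pvLt a b = false) (h2 : pvLt b a = false) : a = b := by
  obtain ⟨a1, a2⟩ := a; obtain ⟨b1, b2⟩ := b
  simp [pvLt] at h1 h2
  have : a1 = b1 := by omega
  subst this
  simp at h1 h2 ⊢
  omega

-- m ≤ b and b ≤ c imply m ≤ c (stated with the false branch of pvLt)
lemma pvLe_trans {m b c : Int × Int} (h1 : pvLt b m = false) (h2 : pvLt c b = false) :
    pvLt c m = false := by
  obtain ⟨m1, m2⟩ := m; obtain ⟨b1, b2⟩ := b; obtain ⟨c1, c2⟩ := c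
  simp [pvLt] at h1 h2 ⊢
  constructor
  · omega
  · intro h; omega

-- m ≤ c and c < b imply m ≤ b
lemma pvLt_le_false {c b m : Int × Int} (h1 : pvLt c b = true) (h2 : pvLt c m = false) :
    pvLt b m = false := by
  obtain ⟨m1, m2⟩ := m; obtain ⟨b1, b2⟩ := b; obtain ⟨c1, c2⟩ := c
  simp [pvLt] at h1 h2 ⊢
  constructor
  · omega
  · intro h; omega

-- ---- the fold of pvUpd computes the lexicographic minimum ----
lemma pvUpd_ne_none (best : Option (Int × Int)) (c : Int × Int) : pvUpd best c ≠ none := by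
  cases best <;> simp [pvUpd] <;> split <;> simp

lemma foldUpd_none_iff {α : Type} (f : α → Int × Int) (l : List α) (acc : Option (Int × Int)) :
    l.foldl (fun b t => pvUpd b (f t)) acc = none ↔ acc = none ∧ l = [] := by
  induction l generalizing acc with
  | nil => simp
  | cons t rest ih =>
    simp only [List.foldl_cons, ih]
    constructor
    · rintro ⟨h, -⟩; exact absurd h (pvUpd_ne_none acc (f t))
    · rintro ⟨-, h⟩; exact absurd h (by simp)

lemma foldUpd_mem {α : Type} (f : α → Int × Int) (l : List α) (acc : Option (Int × Int))
    (m : Int × Int) (h : l.foldl (fun b t => pvUpd b (f t)) acc = some m) :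
    acc = some m ∨ ∃ t ∈ l, m = f t := by
  induction l generalizing acc with
  | nil => simp at h; exact Or.inl (by simp [h])
  | cons t rest ih =>
    simp only [List.foldl_cons] at h
    rcases ih (pvUpd acc (f t)) h with h' | h'
    · cases acc with
      | none => simp [pvUpd] at h'; exact Or.inr ⟨t, by simp, h'.symm⟩
      | some b =>
        simp only [pvUpd] at h'
        split at h'
        · exact Or.inr ⟨t, by simp, by simp at h'; exact h'.symm⟩
        · exact Or.inl (by simp at h'; simp [h'])
    · obtain ⟨s, hs, he⟩ := h'
      exact Or.inr ⟨s, by simp [hs], he⟩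

lemma foldUpd_min {α : Type} (f : α → Int × Int) (l : List α) (acc : Option (Int × Int))
    (m : Int × Int) (h : l.foldl (fun b t => pvUpd b (f t)) acc = some m) :
    (∀ t ∈ l, pvLt (f t) m = false) ∧ (∀ b, acc = some b → pvLt b m = false) := by
  induction l generalizing acc with
  | nil =>
    simp at h
    exact ⟨by simp, fun b hb => by simp [h] at hb; simp [hb, pvLt_self]⟩
  | cons t rest ih =>
    simp only [List.foldl_cons] at h
    obtain ⟨hrest, hacc'⟩ := ih (pvUpd acc (f t)) h
    have hft : pvLt (f t) m = false := by
      cases acc with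
      | none => exact hacc' (f t) rfl
      | some b =>
        simp only [pvUpd] at hacc'
        by_cases hlt : pvLt (f t) b = true
        · exact hacc' (f t) (by simp [hlt])
        · have hb : pvLt b m = false := hacc' b (by simp at hlt; simp [hlt])
          exact pvLe_trans hb (by simpa using hlt)
    refine ⟨fun s hs => ?_, fun b hb => ?_⟩
    · rcases List.mem_cons.mp hs with h' | h'
      · rw [h']; exact hft
      · exact hrest s h'
    · subst hb
      simp only [pvUpd] at hacc'
      by_cases hlt : pvLt (f t) b = true
      · exact pvLt_le_false hlt (hacc' (f t) (by simp [hlt]))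
      · exact hacc' b (by simp at hlt; simp [hlt])

-- fold of pvUpd from a some-state, written with the bare if-update
lemma foldUpd_some (l : List (Int × Int)) (c : Int × Int) :
    l.foldl (fun b t => pvUpd b t) (some c)
      = some (l.foldl (fun b t => if pvLt t b then t else b) c) := by
  induction l generalizing c with
  | nil => rfl
  | cons t rest ih =>
    simp only [List.foldl_cons, pvUpd]
    split <;> exact ih _

-- ---- A's closed form (per-component minima), carried over from the nested loops ----
-- the list of squared distances A examines for one component, in A's order
def fncDists (small_component comp : List (Int × Int)) : List Int :=
  small_component.flatMap (fun p1 => comp.map (fun p2 => (p2.1 - p1.1) ^ 2 + (p2.2 - p1.2) ^ 2))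

-- min() of a nonempty int list
def fncMin : List Int → Int
  | [] => 0
  | x :: xs => xs.foldl min x

-- A's candidate list [(min distance to component i, i), …]
def fncCands (small_component : List (Int × Int)) (s : Int) (ls : List (List (Int × Int))) : List (Int × Int) :=
  (PySem.List.enumerate ls s).filterMap (fun ic =>
    if ic.2 ≠ [] ∧ small_component ≠ [] then some (fncMin (fncDists small_component ic.2), ic.1) else none)

lemma fncFoldlMin_le (l : List Int) : ∀ m : Int, l.foldl min m ≤ m := by
  induction l with
  | nil => intro m; simp
  | cons x xs ih => intro m; exact le_trans (ih (min m x)) (min_le_left m x)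

lemma fncFoldlMin_min (l : List Int) : ∀ m x : Int, l.foldl min (min m x) = min m (l.foldl min x) := by
  induction l with
  | nil => intro m x; simp
  | cons y ys ih => intro m x; simp only [List.foldl_cons, min_assoc]; exact ih m (min x y)

lemma fncFoldlMin_mem (l : List Int) : ∀ x : Int, l.foldl min x ∈ x :: l := by
  induction l with
  | nil => intro x; simp
  | cons y ys ih =>
    intro x
    simp only [List.foldl_cons]
    rcases List.mem_cons.mp (ih (min x y)) with h | h
    · rw [h]
      rcases min_cases x y with ⟨he, -⟩ | ⟨he, -⟩ <;> simp [he]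
    · simp [h]

lemma fncFoldlMin_le_mem (l : List Int) : ∀ (x d : Int), d ∈ l → l.foldl min x ≤ d := by
  induction l with
  | nil => intro x d h; simp at h
  | cons y ys ih =>
    intro x d h
    rcases List.mem_cons.mp h with h' | h'
    · subst h'
      exact le_trans (fncFoldlMin_le ys (min x d)) (min_le_right x d)
    · exact ih (min x y) d h'

lemma fncMin_mem {l : List Int} (h : l ≠ []) : fncMin l ∈ l := by
  cases l with
  | nil => exact absurd rfl h
  | cons x xs => exact fncFoldlMin_mem xs x

lemma fncMin_le {l : List Int} {d : Int} (h : d ∈ l) : fncMin l ≤ d := by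
  cases l with
  | nil => simp at h
  | cons x xs =>
    rcases List.mem_cons.mp h with h' | h'
    · subst h'; exact fncFoldlMin_le xs d
    · exact fncFoldlMin_le_mem xs x d h'

-- A's two inner loops are a fold of fncUpd over the distance list
lemma fncA1 (small_component : List (Int × Int)) : ∀ (comp : List (Int × Int)) (i : Int) (st : Option Int × Int),
    small_component.foldl (fun st p1 =>
      comp.foldl (fun st p2 => fncUpd i st ((p2.1 - p1.1) ^ 2 + (p2.2 - p1.2) ^ 2)) st) st
    = (fncDists small_component comp).foldl (fncUpd i) st := by
  induction small_component with
  | nil => intro comp i st; simp [fncDists]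
  | cons p1 rest ih =>
    intro comp i st
    simp [fncDists, List.foldl_append, List.foldl_map] at *
    rw [ih]

lemma fncA2a (l : List Int) : ∀ (m j i : Int),
    l.foldl (fncUpd i) (some m, j)
    = if l.foldl min m < m then (some (l.foldl min m), i) else (some m, j) := by
  induction l with
  | nil => intro m j i; simp
  | cons c rest ih =>
    intro m j i
    by_cases h : c < m
    · have hmc : min m c = c := by omega
      have hle := fncFoldlMin_le rest c
      simp only [List.foldl_cons, fncUpd, hmc]
      rw [if_pos h, ih c i i]
      by_cases h2 : rest.foldl min c < c
      · rw [if_pos h2, if_pos (by omega)]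
      · have he : rest.foldl min c = c := by omega
        rw [if_neg h2, he, if_pos h]
    · have hmc : min m c = m := by omega
      simp only [List.foldl_cons, fncUpd, hmc]
      rw [if_neg h]
      exact ih m j i

lemma fncA2b (c : Int) (rest : List Int) (j i : Int) :
    (c :: rest).foldl (fncUpd i) (none, j) = (some (fncMin (c :: rest)), i) := by
  have hle := fncFoldlMin_le rest c
  simp only [List.foldl_cons, fncUpd, fncMin]
  rw [fncA2a rest c i i]
  by_cases h2 : rest.foldl min c < c
  · rw [if_pos h2]
  · have he : rest.foldl min c = c := by omega
    rw [if_neg h2, he]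

lemma fncAstep_closed (small_component : List (Int × Int)) (st : Option Int × Int) (i : Int) (comp : List (Int × Int)) :
    fncAstep small_component st (i, comp)
    = if fncDists small_component comp = [] then st
      else match st.1 with
        | none => (some (fncMin (fncDists small_component comp)), i)
        | some m => if fncMin (fncDists small_component comp) < m
                    then (some (fncMin (fncDists small_component comp)), i) else st := by
  rw [fncAstep, fncA1]
  cases hd : fncDists small_component comp with
  | nil => simp
  | cons c rest =>
    rw [if_neg (by simp)]
    obtain ⟨mo, j⟩ := st
    cases mo with
    | none => simpa using fncA2b c rest j i
    | some m =>
      have hG : fncMin (c :: rest) = rest.foldl min c := rfl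
      have hF : (c :: rest).foldl min m = min m (rest.foldl min c) := by
        rw [List.foldl_cons, fncFoldlMin_min]
      rw [fncA2a (c :: rest) m j i, hF]
      simp only [hG]
      by_cases h : rest.foldl min c < m
      · rw [if_pos (by omega), if_pos h]
        have : min m (rest.foldl min c) = rest.foldl min c := by omega
        rw [this]
      · rw [if_neg (by omega), if_neg h]

lemma fncDists_nil_iff (small_component comp : List (Int × Int)) :
    fncDists small_component comp = [] ↔ small_component = [] ∨ comp = [] := by
  cases small_component <;> cases comp <;> simp [fncDists]

lemma fncOuter_some (small_component : List (Int × Int)) : ∀ (ls : List (List (Int × Int))) (s m j : Int), j < s →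
    (PySem.List.enumerate ls s).foldl (fncAstep small_component) (some m, j)
    = ((some ((fncCands small_component s ls).foldl (fun b x => if pvLt x b then x else b) (m, j)).1),
       ((fncCands small_component s ls).foldl (fun b x => if pvLt x b then x else b) (m, j)).2) := by
  intro ls
  induction ls with
  | nil => intro s m j _; simp [fncCands, PySem.List.enumerate_nil]
  | cons comp rest ih =>
    intro s m j hj
    rw [PySem.List.enumerate_cons]
    simp only [List.foldl_cons]
    by_cases hg : comp ≠ [] ∧ small_component ≠ []
    · have hd : fncDists small_component comp ≠ [] := by
        rw [Ne, fncDists_nil_iff]; exact fun hor => hor.elim (fun h => hg.2 h) (fun h => hg.1 h)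
      rw [fncAstep_closed, if_neg hd]
      have hcands : fncCands small_component s (comp :: rest)
          = (fncMin (fncDists small_component comp), s) :: fncCands small_component (s+1) rest := by
        simp [fncCands, PySem.List.enumerate_cons, hg]
      rw [hcands]
      simp only [List.foldl_cons]
      have hlt : pvLt (fncMin (fncDists small_component comp), s) (m, j)
          = decide (fncMin (fncDists small_component comp) < m) := by
        simp [pvLt]
        omega
      rw [hlt]
      by_cases h : fncMin (fncDists small_component comp) < m
      · have hdec : decide (fncMin (fncDists small_component comp) < m) = true := by simpa using h
        rw [hdec, if_pos rfl, if_pos h]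
        exact ih (s+1) (fncMin (fncDists small_component comp)) s (by omega)
      · have hdec : decide (fncMin (fncDists small_component comp) < m) = false := by simpa using h
        rw [hdec, if_neg (by simp : ¬(false = true)), if_neg h]
        exact ih (s+1) m j (by omega)
    · have hd : fncDists small_component comp = [] := by
        rw [fncDists_nil_iff]
        rcases not_and_or.mp hg with h | h
        · right; simpa using h
        · left; simpa using h
      rw [fncAstep_closed, if_pos hd]
      have hcands : fncCands small_component s (comp :: rest) = fncCands small_component (s+1) rest := by
        simp [fncCands, PySem.List.enumerate_cons, hg]
      rw [hcands]
      exact ih (s+1) m j (by omega)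

lemma fncOuter_none (small_component : List (Int × Int)) : ∀ (ls : List (List (Int × Int))) (s j : Int),
    ((PySem.List.enumerate ls s).foldl (fncAstep small_component) (none, j)).2
    = (match fncCands small_component s ls with
       | [] => j
       | c :: cs => (cs.foldl (fun b x => if pvLt x b then x else b) c).2) := by
  intro ls
  induction ls with
  | nil => intro s j; simp [fncCands, PySem.List.enumerate_nil]
  | cons comp rest ih =>
    intro s j
    rw [PySem.List.enumerate_cons]
    simp only [List.foldl_cons]
    by_cases hg : comp ≠ [] ∧ small_component ≠ []
    · have hd : fncDists small_component comp ≠ [] := by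
        rw [Ne, fncDists_nil_iff]; exact fun hor => hor.elim (fun h => hg.2 h) (fun h => hg.1 h)
      rw [fncAstep_closed, if_neg hd]
      have hcands : fncCands small_component s (comp :: rest)
          = (fncMin (fncDists small_component comp), s) :: fncCands small_component (s+1) rest := by
        simp [fncCands, PySem.List.enumerate_cons, hg]
      rw [hcands]
      rw [fncOuter_some small_component rest (s+1) (fncMin (fncDists small_component comp)) s (by omega)]
    · have hd : fncDists small_component comp = [] := by
        rw [fncDists_nil_iff]
        rcases not_and_or.mp hg with h | h
        · right; simpa using h
        · left; simpa using h
      rw [fncAstep_closed, if_pos hd]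
      have hcands : fncCands small_component s (comp :: rest) = fncCands small_component (s+1) rest := by
        simp [fncCands, PySem.List.enumerate_cons, hg]
      rw [hcands]
      exact ih (s+1) j

-- ---- the common specification: minimum of all (squared distance, index) pairs ----
def pvP (small_component : List (Int × Int)) (large_components : List (List (Int × Int)))
    (v : Int × Int) : Prop :=
  ∃ q ∈ small_component, ∃ ic ∈ PySem.List.enumerate large_components 0, ∃ p ∈ ic.2,
    v = ((p.1 - q.1) ^ 2 + (p.2 - q.2) ^ 2, ic.1)

def pvMinOf (o : Option (Int × Int)) (P : Int × Int → Prop) : Prop :=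
  match o with
  | none => ∀ v, ¬ P v
  | some m => P m ∧ ∀ v, P v → pvLt v m = false

lemma pvMinOf_unique {o1 o2 : Option (Int × Int)} {P : Int × Int → Prop}
    (h1 : pvMinOf o1 P) (h2 : pvMinOf o2 P) : o1 = o2 := by
  cases o1 with
  | none =>
    cases o2 with
    | none => rfl
    | some m2 => exact absurd h2.1 (h1 m2)
  | some m1 =>
    cases o2 with
    | none => exact absurd h1.1 (h2 m1)
    | some m2 =>
      have := pvLt_asymm_eq (h1.2 m2 h2.1) (h2.2 m1 h1.1)
      rw [this]

-- ---- A's fold over the candidates is the minimum of pvP ----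
lemma cands_mem_of {small_component : List (Int × Int)} {large_components : List (List (Int × Int))}
    {i : Int} {comp : List (Int × Int)}
    (hic : (i, comp) ∈ PySem.List.enumerate large_components 0)
    (hc : comp ≠ []) (hs : small_component ≠ []) :
    (fncMin (fncDists small_component comp), i) ∈ fncCands small_component 0 large_components := by
  rw [fncCands, List.mem_filterMap]
  exact ⟨(i, comp), hic, by simp [hc, hs]⟩

lemma mem_fncDists {small_component comp : List (Int × Int)} {d : Int} :
    d ∈ fncDists small_component comp
      ↔ ∃ q ∈ small_component, ∃ p ∈ comp, d = (p.1 - q.1) ^ 2 + (p.2 - q.2) ^ 2 := by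
  simp only [fncDists, List.mem_flatMap, List.mem_map]
  constructor
  · rintro ⟨q, hq, p, hp, rfl⟩; exact ⟨q, hq, p, hp, rfl⟩
  · rintro ⟨q, hq, p, hp, rfl⟩; exact ⟨q, hq, p, hp, rfl⟩

lemma cands_min (small_component : List (Int × Int)) (large_components : List (List (Int × Int))) :
    pvMinOf ((fncCands small_component 0 large_components).foldl (fun b t => pvUpd b t) none)
      (pvP small_component large_components) := by
  cases ho : (fncCands small_component 0 large_components).foldl (fun b t => pvUpd b t) none with
  | none =>
    have hnil : fncCands small_component 0 large_components = [] :=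
      ((foldUpd_none_iff id _ none).mp ho).2
    intro v hv
    obtain ⟨q, hq, ic, hic, p, hp, rfl⟩ := hv
    have : (fncMin (fncDists small_component ic.2), ic.1) ∈ fncCands small_component 0 large_components :=
      cands_mem_of (by obtain ⟨i, c⟩ := ic; exact hic) (List.ne_nil_of_mem hp) (List.ne_nil_of_mem hq)
    rw [hnil] at this
    simp at this
  | some m =>
    constructor
    · -- m is itself a pair distance
      rcases foldUpd_mem id _ none m ho with h | ⟨t, ht, rfl⟩
      · simp at h
      · rw [fncCands, List.mem_filterMap] at ht
        obtain ⟨ic, hic, hif⟩ := ht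
        by_cases hg : ic.2 ≠ [] ∧ small_component ≠ []
        · rw [if_pos hg] at hif
          have hmem : fncMin (fncDists small_component ic.2) ∈ fncDists small_component ic.2 := by
            apply fncMin_mem
            rw [Ne, fncDists_nil_iff]
            exact fun hor => hor.elim (fun h => hg.2 h) (fun h => hg.1 h)
          obtain ⟨q, hq, p, hp, he⟩ := mem_fncDists.mp hmem
          obtain rfl : (fncMin (fncDists small_component ic.2), ic.1) = m := by simpa using hif
          exact ⟨q, hq, ic, hic, p, hp, by rw [he]⟩
        · rw [if_neg hg] at hif; simp at hif
    · -- m is below every pair distance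
      intro v hv
      obtain ⟨q, hq, ic, hic, p, hp, rfl⟩ := hv
      have hcmem : (fncMin (fncDists small_component ic.2), ic.1) ∈ fncCands small_component 0 large_components :=
        cands_mem_of (by obtain ⟨i, c⟩ := ic; exact hic) (List.ne_nil_of_mem hp) (List.ne_nil_of_mem hq)
      have hle := (foldUpd_min id _ none m ho).1 _ hcmem
      have hdle : fncMin (fncDists small_component ic.2) ≤ (p.1 - q.1) ^ 2 + (p.2 - q.2) ^ 2 :=
        fncMin_le (mem_fncDists.mpr ⟨q, hq, p, hp, rfl⟩)
      refine pvLe_trans hle ?_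
      simp [pvLt]
      omega

-- A equals the projection of the candidate-fold minimum
lemma A_eq_proj (small_component : List (Int × Int)) (large_components : List (List (Int × Int))) :
    find_nearest_component small_component large_components
      = (match (fncCands small_component 0 large_components).foldl (fun b t => pvUpd b t) none with
         | none => -1
         | some m => m.2) := by
  rw [find_nearest_component, fncOuter_none]
  cases hc : fncCands small_component 0 large_components with
  | nil => simp
  | cons c cs =>
    simp only [List.foldl_cons]
    rw [show pvUpd none c = some c from rfl, foldUpd_some]

-- ---- B's pruned scans equal the unpruned fold over the same list ----
lemma foldUpd_id_of_ge {α : Type} (f : α → Int × Int) (b : Int × Int) (l : List α)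
    (h : ∀ s ∈ l, pvLt (f s) b = false) :
    l.foldl (fun b t => pvUpd b (f t)) (some b) = some b := by
  induction l with
  | nil => rfl
  | cons t rest ih =>
    have h0 : pvUpd (some b) (f t) = some b := by
      simp [pvUpd, h t (by simp)]
    simp only [List.foldl_cons]
    rw [h0]
    exact ih (fun s hs => h s (by simp [hs]))

lemma sq_mono_right {a c : Int} (h0 : 0 ≤ a) (hac : a ≤ c) : a ^ 2 ≤ c ^ 2 := by
  nlinarith

lemma scanR_eq_foldl (qx qy : Int) (l : List (Int × Int × Int))
    (hsort : l.Pairwise (fun a b => a.1 ≤ b.1)) (best : Option (Int × Int)) :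
    pvScanR qx qy l best = l.foldl (fun b t => pvUpd b (pvCand qx qy t)) best := by
  induction l generalizing best with
  | nil => rfl
  | cons t rest ih =>
    rw [pvScanR, List.foldl_cons]
    by_cases hb : pvBrkR qx t.1 best = true
    · rw [if_pos hb]
      cases best with
      | none => simp [pvBrkR] at hb
      | some b =>
        simp only [pvBrkR, Bool.and_eq_true, decide_eq_true_eq] at hb
        obtain ⟨hqx, hgt⟩ := hb
        have hall : ∀ s ∈ t :: rest, pvLt (pvCand qx qy s) b = false := by
          intro s hs
          have hxs : t.1 ≤ s.1 := by
            rcases List.mem_cons.mp hs with h | h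
            · rw [h]
            · exact (List.pairwise_cons.mp hsort).1 s h
          have h1 : (t.1 - qx) ^ 2 ≤ (s.1 - qx) ^ 2 := sq_mono_right (by omega) (by omega)
          have h2 : 0 ≤ (s.2.1 - qy) ^ 2 := sq_nonneg _
          simp [pvCand, pvLt]
          constructor
          · omega
          · intro h; omega
        exact (foldUpd_id_of_ge (pvCand qx qy) b (t :: rest) hall).symm
    · rw [if_neg hb]
      exact ih (List.pairwise_cons.mp hsort).2 _

lemma scanL_eq_foldl (qx qy : Int) (l : List (Int × Int × Int))
    (hsort : l.Pairwise (fun a b => b.1 ≤ a.1)) (best : Option (Int × Int)) :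
    pvScanL qx qy l best = l.foldl (fun b t => pvUpd b (pvCand qx qy t)) best := by
  induction l generalizing best with
  | nil => rfl
  | cons t rest ih =>
    rw [pvScanL, List.foldl_cons]
    by_cases hb : pvBrkL qx t.1 best = true
    · rw [if_pos hb]
      cases best with
      | none => simp [pvBrkL] at hb
      | some b =>
        simp only [pvBrkL, Bool.and_eq_true, decide_eq_true_eq] at hb
        obtain ⟨hqx, hgt⟩ := hb
        have hall : ∀ s ∈ t :: rest, pvLt (pvCand qx qy s) b = false := by
          intro s hs
          have hxs : s.1 ≤ t.1 := by
            rcases List.mem_cons.mp hs with h | h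
            · rw [h]
            · exact (List.pairwise_cons.mp hsort).1 s h
          have h1 : (qx - t.1) ^ 2 ≤ (qx - s.1) ^ 2 := sq_mono_right (by omega) (by omega)
          have h1' : (t.1 - qx) ^ 2 ≤ (s.1 - qx) ^ 2 := by
            have e1 : (qx - t.1) ^ 2 = (t.1 - qx) ^ 2 := by ring
            have e2 : (qx - s.1) ^ 2 = (s.1 - qx) ^ 2 := by ring
            omega
          have h2 : 0 ≤ (s.2.1 - qy) ^ 2 := sq_nonneg _
          simp [pvCand, pvLt]
          constructor
          · omega
          · intro h; omega
        exact (foldUpd_id_of_ge (pvCand qx qy) b (t :: rest) hall).symm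
    · rw [if_neg hb]
      exact ih (List.pairwise_cons.mp hsort).2 _

-- the per-query element list B actually walks
def pvListq (pts : List (Int × Int × Int)) (q : Int × Int) : List (Int × Int × Int) :=
  pts.drop (pvBisect pts q.1 pts.length 0 pts.length)
    ++ (pts.take (pvBisect pts q.1 pts.length 0 pts.length)).reverse

lemma mem_pvListq {pts : List (Int × Int × Int)} {q : Int × Int} {t : Int × Int × Int} :
    t ∈ pvListq pts q ↔ t ∈ pts := by
  rw [pvListq, List.mem_append, List.mem_reverse, or_comm,
    ← List.mem_append, List.take_append_drop]

lemma pvStep_eq_foldl (pts : List (Int × Int × Int))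
    (hsort : pts.Pairwise (fun a b => a.1 ≤ b.1)) (best : Option (Int × Int)) (q : Int × Int) :
    pvStep pts best q = (pvListq pts q).foldl (fun b t => pvUpd b (pvCand q.1 q.2 t)) best := by
  rw [pvStep, pvListq, List.foldl_append]
  rw [scanR_eq_foldl _ _ _ (hsort.sublist (List.drop_sublist _ _)) best]
  rw [scanL_eq_foldl]
  exact (List.pairwise_reverse).mpr (hsort.sublist (List.take_sublist _ _))

-- B's whole query loop is the fold of pvUpd over all candidate pairs
lemma B_fold_eq (pts : List (Int × Int × Int)) (hsort : pts.Pairwise (fun a b => a.1 ≤ b.1)) :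
    ∀ (small : List (Int × Int)) (acc : Option (Int × Int)),
    small.foldl (pvStep pts) acc
      = (small.flatMap (fun q => (pvListq pts q).map (pvCand q.1 q.2))).foldl
          (fun b t => pvUpd b t) acc := by
  intro small
  induction small with
  | nil => intro acc; rfl
  | cons q rest ih =>
    intro acc
    rw [List.foldl_cons, List.flatMap_cons, List.foldl_append, List.foldl_map,
      pvStep_eq_foldl pts hsort acc q, ih]

lemma mem_pvLabeled {large_components : List (List (Int × Int))} {t : Int × Int × Int} :
    t ∈ pvLabeled large_components
      ↔ ∃ ic ∈ PySem.List.enumerate large_components 0, ∃ p ∈ ic.2, t = (p.1, p.2, ic.1) := by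
  simp only [pvLabeled, List.mem_flatMap, List.mem_map]
  constructor
  · rintro ⟨ic, hic, p, hp, rfl⟩; exact ⟨ic, hic, p, hp, rfl⟩
  · rintro ⟨ic, hic, p, hp, rfl⟩; exact ⟨ic, hic, p, hp, rfl⟩

-- B's fold is the minimum of pvP
lemma B_min (small_component : List (Int × Int)) (large_components : List (List (Int × Int))) :
    pvMinOf (small_component.foldl
        (pvStep (PySem.List.sorted (pvLabeled large_components) (fun t => t.1) false)) none)
      (pvP small_component large_components) := by
  have hsort := PySem.List.sorted_pairwise (pvLabeled large_components) (fun t => t.1)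
  set pts := PySem.List.sorted (pvLabeled large_components) (fun t => t.1) false with hpts
  have hmempts : ∀ t : Int × Int × Int, t ∈ pts ↔ t ∈ pvLabeled large_components :=
    fun t => (PySem.List.sorted_perm (pvLabeled large_components) (fun t => t.1) false).mem_iff
  rw [B_fold_eq pts hsort]
  -- membership in the flattened candidate list is exactly pvP
  have hmem : ∀ v : Int × Int,
      (v ∈ small_component.flatMap (fun q => (pvListq pts q).map (pvCand q.1 q.2)))
        ↔ pvP small_component large_components v := by
    intro v
    simp only [List.mem_flatMap, List.mem_map]
    constructor
    · rintro ⟨q, hq, t, ht, rfl⟩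
      have ht' := (hmempts t).mp (mem_pvListq.mp ht)
      obtain ⟨ic, hic, p, hp, rfl⟩ := mem_pvLabeled.mp ht'
      exact ⟨q, hq, ic, hic, p, hp, rfl⟩
    · rintro ⟨q, hq, ic, hic, p, hp, rfl⟩
      refine ⟨q, hq, (p.1, p.2, ic.1), ?_, rfl⟩
      exact mem_pvListq.mpr ((hmempts _).mpr (mem_pvLabeled.mpr ⟨ic, hic, p, hp, rfl⟩))
  cases ho : (small_component.flatMap (fun q => (pvListq pts q).map (pvCand q.1 q.2))).foldl
      (fun b t => pvUpd b t) none with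
  | none =>
    have hnil := ((foldUpd_none_iff id _ none).mp ho).2
    intro v hv
    have := (hmem v).mpr hv
    rw [hnil] at this
    simp at this
  | some m =>
    constructor
    · rcases foldUpd_mem id _ none m ho with h | ⟨t, ht, he⟩
      · simp at h
      · rw [show m = t from he]
        exact (hmem t).mp ht
    · intro v hv
      exact (foldUpd_min id _ none m ho).1 v ((hmem v).mpr hv)

-- ===== VERDICT (by name: the statement is the Claim_ definition above) =====
theorem find_nearest_component_spec : Claim_equal_find_nearest_component := by
  intro small_component large_components _
  unfold Spec_find_nearest_component
  rw [A_eq_proj, find_nearest_component_alt]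
  have hA := cands_min small_component large_components
  have hB := B_min small_component large_components
  have := pvMinOf_unique hA hB
  rw [this]
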